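-- pv_equiv track=rewrite | github.com/JulesLalu/raffle-lahaye | app.py | create_firm_statistics
-- ===== SOURCE A (Python) =====
-- def create_firm_statistics(orders: list) -> dict:
--     """Create firm statistics showing total tickets distributed per firm."""
--     firm_stats = {}
--
--     for order in orders:
--         firm = order.get("firm", "").strip()
--         if not firm:
--             firm = "No Firm"  # Handle empty firm names
--
--         num_tickets = int(order.get("num_tickets", 0))
--         firm_stats[firm] = firm_stats.get(firm, 0) + num_tickets
--
--     return firm_stats
-- ===== SOURCE B (Python) =====
-- def create_firm_statistics(orders: list) -> dict:
--     """Create firm statistics showing total tickets distributed per firm."""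
--     pairs = [((order.get("firm", "").strip() or "No Firm"),
--               int(order.get("num_tickets", 0)))
--              for order in orders]
--     stats = {}
--     rest = pairs
--     while rest:
--         (firm, tickets), rest = rest[0], rest[1:]
--         stats[firm] = tickets + sum(v for g, v in rest if g == firm)
--         rest = [(g, v) for g, v in rest if g != firm]
--     return stats
-- ===== Notes on version B (the rewrite author's own statement) =====
-- stated objective: alternative
-- what changed: Replaces the single-pass dict accumulation with an iterative partition: normalize orders to a (firm, tickets) pair list, then repeatedly pop the first remaining firm, sum its tickets across the rest and drop all its pairs, so no dict accumulator or hash lookup is kept.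
import Mathlib
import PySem

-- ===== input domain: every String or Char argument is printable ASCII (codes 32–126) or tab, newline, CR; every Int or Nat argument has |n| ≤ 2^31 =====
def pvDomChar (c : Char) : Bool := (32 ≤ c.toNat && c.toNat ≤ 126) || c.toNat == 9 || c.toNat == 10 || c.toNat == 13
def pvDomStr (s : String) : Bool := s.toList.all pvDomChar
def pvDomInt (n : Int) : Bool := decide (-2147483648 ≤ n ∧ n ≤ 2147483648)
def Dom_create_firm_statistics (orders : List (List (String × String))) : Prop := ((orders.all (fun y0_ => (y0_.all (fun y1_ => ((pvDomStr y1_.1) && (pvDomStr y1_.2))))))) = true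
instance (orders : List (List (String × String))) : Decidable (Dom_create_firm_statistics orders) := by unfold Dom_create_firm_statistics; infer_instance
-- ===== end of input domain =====

-- B replaces A's single-pass dict accumulation by an iterative partition: normalize to a pair
-- list, then repeatedly take the first remaining firm, sum its tickets over the rest and drop
-- its pairs; alternative decomposition (no dict accumulator), same results.


-- ===== PORT A =====
-- firm = order.get("firm", "").strip(); if not firm: firm = "No Firm"
def pvFirmA (o : List (String × String)) : String :=
  let f := PySem.Str.strip (PySem.Dict.getD (PySem.Dict.mk o) "firm" "")
  if f = "" then "No Firm" else f

-- num_tickets = int(order.get("num_tickets", 0)); the missing-key default 0 makes int(0) = 0,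
-- int(s) is PySem.Int.ofStr? (none = ValueError, excluded by Pre_; .getD 0 is never reached there)
def pvTicketsA (o : List (String × String)) : Int :=
  match PySem.Dict.get? (PySem.Dict.mk o) "num_tickets" with
  | none => 0
  | some s => (PySem.Int.ofStr? s).getD 0

def create_firm_statistics (orders : List (List (String × String))) : List (String × Int) :=
  (orders.foldl
    (fun stats o =>
      PySem.Dict.insert stats (pvFirmA o) (PySem.Dict.getD stats (pvFirmA o) 0 + pvTicketsA o))
    PySem.Dict.empty).items

-- ===== PORT B =====
-- one normalized pair per order: ((order.get("firm","").strip() or "No Firm"), int(order.get("num_tickets",0)))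
def pvNormB (o : List (String × String)) : String × Int :=
  let d := PySem.Dict.mk o
  let f := PySem.Str.strip ((PySem.Dict.get? d "firm").getD "")
  ((if f = "" then "No Firm" else f),
   (PySem.Dict.get? d "num_tickets").elim (0 : Int) (fun s => (PySem.Int.ofStr? s).getD 0))

-- the while loop: pop the first pair, emit its firm with the summed tickets of its duplicates,
-- keep only the pairs of other firms (structural recursion = the loop on the shrinking `rest`)
def pvTallyB : List (String × Int) → List (String × Int)
  | [] => []
  | (f, t) :: rest =>
    (f, t + ((rest.filter (fun p => p.1 == f)).map Prod.snd).sum)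
      :: pvTallyB (rest.filter (fun p => !(p.1 == f)))
termination_by l => l.length
decreasing_by
  simpa using le_trans (List.length_filter_le _ rest.attach) (by simp)

def create_firm_statistics_alt (orders : List (List (String × String))) : List (String × Int) :=
  pvTallyB (orders.map pvNormB)

-- ===== PRECONDITION & SPEC =====
-- Pre_ excludes exactly the inputs where int(order["num_tickets"]) raises ValueError (a present
-- "num_tickets" value that is not an int-parsable string); A returns on everything else.
def Pre_create_firm_statistics (orders : List (List (String × String))) : Prop :=
  (orders.all (fun o =>
    (PySem.Dict.get? (PySem.Dict.mk o) "num_tickets").elim true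
      (fun s => (PySem.Int.ofStr? s).isSome))) = true
instance (orders : List (List (String × String))) : Decidable (Pre_create_firm_statistics orders) := by unfold Pre_create_firm_statistics; infer_instance
def pvWitness_create_firm_statistics : (List (List (String × String))) :=
  [[("firm", " Acme "), ("num_tickets", " 7 ")], [("firm", "  "), ("num_tickets", "+5")], [("firm", "Acme")]]

def Spec_create_firm_statistics (orders : List (List (String × String))) (out : List (String × Int)) : Prop := out = create_firm_statistics_alt orders
instance (orders : List (List (String × String))) (out : List (String × Int)) : Decidable (Spec_create_firm_statistics orders out) := by unfold Spec_create_firm_statistics; infer_instance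

-- ===== CLAIM (what is proved, stated in full; the proofs are below) =====
def Claim_equal_create_firm_statistics : Prop := ∀ (orders : List (List (String × String))), Dom_create_firm_statistics orders → Pre_create_firm_statistics orders → Spec_create_firm_statistics orders (create_firm_statistics orders)

-- ===== LEMMAS AND PROOFS =====

-- Python-ordered dedup commutes with filter
theorem pvDedupFilter (xs : List String) (p : String → Bool) :
    PySem.List.dedup (xs.filter p) = (PySem.List.dedup xs).filter p := by
  induction xs with
  | nil => rfl
  | cons x t ih =>
    simp only [List.filter_cons, PySem.List.dedup_eq_ofList, PySem.Set.ofList_cons] at *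
    by_cases h : p x
    · simp only [h, if_pos, PySem.Set.ofList_cons, ih]
      simp [PySem.Set.discard, List.filter_filter]
      exact List.filter_congr (fun a _ => by rw [Bool.and_comm])
    · simp only [h, Bool.false_eq_true, if_false, ih]
      simp only [PySem.Set.discard, List.filter_filter]
      refine (List.filter_congr (fun a _ => ?_)).symm
      by_cases hax : a = x
      · subst hax; simp [h]
      · simp [hax]

-- B's partition loop produces, for each firm in first-appearance order, the sum of its tickets
theorem pvTallyB_eq (l : List (String × Int)) :
    pvTallyB l = (PySem.List.dedup (l.map Prod.fst)).map
      (fun f => (f, ((l.filter (fun p => p.1 == f)).map Prod.snd).sum)) := by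
  induction hn : l.length using Nat.strong_induction_on generalizing l with
  | _ n ih =>
  match l with
  | [] => simp [pvTallyB]
  | (f, t) :: rest =>
    have ihr := ih (rest.filter (fun p => !(p.1 == f))).length
      (by have hle := List.length_filter_le (fun p => !(p.1 == f)) rest
          simp only [List.length_cons] at hn; omega) (rest.filter (fun p => !(p.1 == f))) rfl
    rw [pvTallyB]
    have hmapfst : (rest.filter (fun p => !(p.1 == f))).map Prod.fst
        = (rest.map Prod.fst).filter (fun g => !(g == f)) := by
      show (rest.filter ((fun g => !(g == f)) ∘ Prod.fst)).map Prod.fst = _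
      exact (List.filter_map).symm
    rw [ihr]
    simp only [List.map_cons, PySem.List.dedup_eq_ofList, PySem.Set.ofList_cons, List.map_cons]
    refine List.cons_eq_cons.mpr ⟨by simp, ?_⟩
    rw [hmapfst, ← PySem.List.dedup_eq_ofList, ← PySem.List.dedup_eq_ofList,
      pvDedupFilter]
    have hdisc : PySem.Set.discard (PySem.List.dedup (rest.map Prod.fst)) f
        = (PySem.List.dedup (rest.map Prod.fst)).filter (fun g => !(g == f)) := by
      simp [PySem.Set.discard]
    rw [hdisc]
    refine List.map_congr_left (fun g hg => ?_)
    have hgf : ¬ (g = f) := by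
      have := List.of_mem_filter hg
      simpa using this
    have hfl : ((f, t) :: rest).filter (fun p => p.1 == g)
        = (rest.filter (fun p => !(p.1 == f))).filter (fun p => p.1 == g) := by
      rw [List.filter_cons]
      have hne : ¬ ((f, t).1 = g) := fun h => hgf h.symm
      simp only [hne, beq_iff_eq, List.filter_filter]
      refine (List.filter_congr (fun p _ => ?_)).symm
      by_cases hp : p.1 = g
      · simp [hp, hgf]
      · simp [hp]
    rw [hfl]

-- the running total the A-side fold keeps at key g is the sum of the tickets of g's pairs
theorem pvTallyGetD (l : List (String × Int)) (d : PySem.Dict String Int) (g : String) :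
    (l.foldl (fun d p => PySem.Dict.insert d p.1 (PySem.Dict.getD d p.1 0 + p.2)) d).getD g 0
      = d.getD g 0 + ((l.filter (fun p => p.1 == g)).map Prod.snd).sum := by
  induction l generalizing d with
  | nil => simp
  | cons p t ih =>
    simp only [List.foldl_cons, ih, List.filter_cons]
    rcases eq_or_ne p.1 g with h | h
    · simp [h, PySem.Dict.getD_insert_self]
      ring
    · simp [PySem.Dict.getD_insert, h, Ne.symm h]

-- B's normalization computes exactly A's two per-order values
theorem pvNormB_eq (o : List (String × String)) : pvNormB o = (pvFirmA o, pvTicketsA o) := by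
  simp only [pvNormB, pvFirmA, pvTicketsA, PySem.Dict.getD, Option.elim]
  cases PySem.Dict.get? (PySem.Dict.mk o) "num_tickets" <;>
    cases PySem.Dict.get? (PySem.Dict.mk o) "firm" <;> rfl

theorem create_firm_statistics_eq (orders : List (List (String × String))) :
    create_firm_statistics orders = create_firm_statistics_alt orders := by
  unfold create_firm_statistics create_firm_statistics_alt
  have hmap : orders.map pvNormB = orders.map (fun o => (pvFirmA o, pvTicketsA o)) :=
    List.map_congr_left (fun o _ => pvNormB_eq o)
  rw [hmap]
  set l := orders.map (fun o => (pvFirmA o, pvTicketsA o)) with hl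
  have hfold : orders.foldl
      (fun stats o =>
        PySem.Dict.insert stats (pvFirmA o) (PySem.Dict.getD stats (pvFirmA o) 0 + pvTicketsA o))
      PySem.Dict.empty
    = l.foldl (fun d p => PySem.Dict.insert d p.1 (PySem.Dict.getD d p.1 0 + p.2))
        PySem.Dict.empty := by
    rw [hl, List.foldl_map]
  rw [hfold]
  set D := l.foldl (fun d p => PySem.Dict.insert d p.1 (PySem.Dict.getD d p.1 0 + p.2))
      PySem.Dict.empty with hD
  have hnd : D.keys.Nodup := by
    rw [hD]
    exact PySem.Dict.nodup_keys_foldl_insert_key l Prod.fst _ _ (by simp)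
  have hkeys : D.keys = PySem.Set.ofList (l.map Prod.fst) := by
    rw [hD, PySem.Dict.keys_foldl_insert_key]
    simp [PySem.Dict.keys, PySem.Dict.empty, PySem.Set.update_nil_left]
  rw [PySem.Dict.items_eq_map_keys D hnd 0, hkeys, pvTallyB_eq]
  simp only [PySem.List.dedup_eq_ofList]
  refine List.map_congr_left (fun f hf => ?_)
  rw [hD, pvTallyGetD]
  simp

-- ===== VERDICT (by name: the statement is the Claim_ definition above) =====
theorem create_firm_statistics_spec : Claim_equal_create_firm_statistics := by
  intro orders _ _
  exact create_firm_statistics_eq orders
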